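-- pv_equiv track=rewrite | github.com/sam-evans/Clab | clabtest/react/server/notes_to_sheet_music.py | generate_output_filename
-- ===== SOURCE A (Python) =====
-- def generate_output_filename(input_name: str):
--     split_name = input_name.split(".")
--     split_base_name = split_name[:len(split_name)-1]
--     base_name = ""
--     for part in split_base_name:
--         base_name += part
--
--     # if this character is at the start of the
--     # input file name, it will not be able to
--     # create the output file. "Error: access denied"
--     if base_name[0] == "\\":
--         base_name = base_name[1:]
--     return(base_name)
-- ===== SOURCE B (Python) =====
-- def generate_output_filename(input_name: str):
--     stem, _, _ = input_name.rpartition(".")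
--     base_name = stem.replace(".", "")
--     if base_name[0] == "\\":
--         base_name = base_name[1:]
--     return base_name
-- ===== Notes on version B (the rewrite author's own statement) =====
-- stated objective: simpler
-- what changed: Replaces A's split-on-dot / drop-last-segment / concatenation loop by rpartition on the dot to take the stem before the last dot, followed by a replace that removes interior dots; Pre_ excludes inputs whose base is empty, on which A raises IndexError (B raises IndexError there too).
import Mathlib
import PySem

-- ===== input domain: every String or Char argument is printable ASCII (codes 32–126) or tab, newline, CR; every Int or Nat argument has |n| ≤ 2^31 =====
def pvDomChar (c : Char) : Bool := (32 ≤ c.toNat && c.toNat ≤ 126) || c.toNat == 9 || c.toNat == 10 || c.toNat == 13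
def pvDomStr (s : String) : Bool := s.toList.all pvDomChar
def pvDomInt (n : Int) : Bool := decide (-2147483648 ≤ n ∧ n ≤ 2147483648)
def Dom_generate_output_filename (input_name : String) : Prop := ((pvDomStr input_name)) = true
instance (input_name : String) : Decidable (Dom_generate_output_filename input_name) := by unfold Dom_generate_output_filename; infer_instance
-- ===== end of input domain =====

-- B replaces A's split/slice/concat loop by rpartition('.') + replace('.', '') (objective: simpler decomposition, same cost).

-- ===== PORT A =====
def generate_output_filename (input_name : String) : String :=
  let split_name := PySem.Chars.splitOn input_name.toList ['.']
  let split_base_name := PySem.List.slice split_name none (some ((split_name.length : Int) - 1))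
  let base_name := split_base_name.foldl (fun acc part => acc ++ part) ([] : List Char)
  match PySem.List.pyGet? base_name 0 with
  | none => String.ofList base_name   -- Python raises IndexError here (excluded by Pre_)
  | some c =>
    String.ofList (if c = '\\' then PySem.List.slice base_name (some 1) none else base_name)

-- ===== PORT B =====
-- hand port of the stem (first) component of str.rpartition("."):
-- everything before the LAST '.'; empty when no '.' occurs (exact on all inputs)
def pvRStem : List Char → List Char
  | [] => []
  | c :: t => if '.' ∈ t then c :: pvRStem t else []

def generate_output_filename_alt (input_name : String) : String :=
  let stem := pvRStem input_name.toList
  let base_name := PySem.Chars.replace stem ['.'] []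
  match PySem.List.pyGet? base_name 0 with
  | none => String.ofList base_name   -- Python raises IndexError here (excluded by Pre_)
  | some c =>
    String.ofList (if c = '\\' then PySem.List.slice base_name (some 1) none else base_name)

-- ===== PRECONDITION & SPEC =====
-- Pre_ excludes exactly the inputs on which Python A raises IndexError (base_name empty:
-- no non-dot character occurs before the last dot); B raises IndexError there too.
def Pre_generate_output_filename (input_name : String) : Prop :=
  '.' ∈ input_name.toList.dropWhile (fun c => c = '.')
instance (input_name : String) : Decidable (Pre_generate_output_filename input_name) := by
  unfold Pre_generate_output_filename; infer_instance

def pvWitness_generate_output_filename : String := "a.mid"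

def Spec_generate_output_filename (input_name : String) (out : String) : Prop := out = generate_output_filename_alt input_name
instance (input_name : String) (out : String) : Decidable (Spec_generate_output_filename input_name out) := by unfold Spec_generate_output_filename; infer_instance

-- ===== CLAIM (what is proved, stated in full; the proofs are below) =====
def Claim_equal_generate_output_filename : Prop := ∀ (input_name : String), Dom_generate_output_filename input_name → Pre_generate_output_filename input_name → Spec_generate_output_filename input_name (generate_output_filename input_name)

-- ===== LEMMAS AND PROOFS =====

-- simple structural form of PySem.Chars.splitOn with separator ['.']
def pvSplitAux : List Char → List Char → List (List Char)
  | [], cur => [cur.reverse]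
  | c :: t, cur => if c = '.' then cur.reverse :: pvSplitAux t [] else pvSplitAux t (c :: cur)

theorem pvGo_eq (l : List Char) : ∀ (fuel : Nat) (cur : List Char) (acc : List (List Char)),
    l.length < fuel →
    PySem.Chars.splitOn.go ['.'] fuel l cur acc = acc.reverse ++ pvSplitAux l cur := by
  induction l with
  | nil =>
    intro fuel cur acc h
    match fuel, h with
    | fuel+1, _ => simp [PySem.Chars.splitOn.go, pvSplitAux]
  | cons c t ih =>
    intro fuel cur acc h
    match fuel, h with
    | fuel+1, h =>
      rw [PySem.Chars.splitOn.go]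
      by_cases hc : c = '.'
      · subst hc
        simp only [List.length_cons] at h
        rw [if_pos (by simp [List.isPrefixOf])]
        rw [show (List.drop (List.length ['.']) ('.' :: t)) = t from by simp]
        rw [ih _ _ _ (by omega)]
        simp [pvSplitAux]
      · rw [if_neg (by simp [List.isPrefixOf, Ne.symm hc])]
        simp only [List.length_cons] at h
        rw [ih _ _ _ (by omega)]
        simp [pvSplitAux, hc]

theorem pvSplitOn_eq (cs : List Char) :
    PySem.Chars.splitOn cs ['.'] = pvSplitAux cs [] := by
  have := pvGo_eq cs (cs.length + 1) [] [] (by omega)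
  simpa [PySem.Chars.splitOn] using this

theorem pvSplitAux_ne_nil (l cur : List Char) : pvSplitAux l cur ≠ [] := by
  induction l generalizing cur with
  | nil => simp [pvSplitAux]
  | cons c t ih => by_cases hc : c = '.' <;> simp [pvSplitAux, hc, ih]

-- Chars.replace with old = ['.'], new = [] is the dot filter
theorem pvReplaceGo_eq (l : List Char) : ∀ (fuel : Nat) (acc : List Char),
    l.length ≤ fuel →
    PySem.Chars.replace.go ['.'] [] fuel l acc = acc.reverse ++ l.filter (fun c => c ≠ '.') := by
  induction l with
  | nil =>
    intro fuel acc _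
    cases fuel <;> simp [PySem.Chars.replace.go]
  | cons c t ih =>
    intro fuel acc h
    match fuel, h with
    | fuel+1, h =>
      rw [PySem.Chars.replace.go]
      simp only [List.length_cons] at h
      by_cases hc : c = '.'
      · subst hc
        rw [if_pos (by simp [List.isPrefixOf])]
        rw [show (List.drop (List.length ['.']) ('.' :: t)) = t from by simp]
        rw [ih _ _ (by omega)]
        simp
      · rw [if_neg (by simp [List.isPrefixOf, Ne.symm hc])]
        rw [ih _ _ (by omega)]
        simp [hc]

theorem pvReplace_eq (cs : List Char) :
    PySem.Chars.replace cs ['.'] [] = cs.filter (fun c => c ≠ '.') := by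
  rw [PySem.Chars.replace]
  rw [if_neg (by simp)]
  simpa using pvReplaceGo_eq cs cs.length [] (le_refl _)

theorem pvRStem_of_no_dot (cs : List Char) (h : '.' ∉ cs) : pvRStem cs = [] := by
  cases cs with
  | nil => rfl
  | cons c t =>
    have : '.' ∉ t := fun hm => h (List.mem_cons_of_mem _ hm)
    simp [pvRStem, this]

theorem pvMaster (cs : List Char) : ∀ cur : List Char,
    (pvSplitAux cs cur).dropLast.flatten =
      if '.' ∈ cs then cur.reverse ++ (pvRStem cs).filter (fun c => c ≠ '.') else [] := by
  induction cs with
  | nil => intro cur; simp [pvSplitAux]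
  | cons c t ih =>
    intro cur
    by_cases hc : c = '.'
    · subst hc
      rw [show pvSplitAux ('.' :: t) cur = cur.reverse :: pvSplitAux t [] from by simp [pvSplitAux]]
      rw [List.dropLast_cons_of_ne_nil (pvSplitAux_ne_nil t [])]
      rw [List.flatten_cons, ih []]
      rw [if_pos (show ('.' : Char) ∈ '.' :: t from by simp)]
      by_cases ht : '.' ∈ t
      · simp [pvRStem, ht]
      · simp [pvRStem, ht]
    · rw [show pvSplitAux (c :: t) cur = pvSplitAux t (c :: cur) from by simp [pvSplitAux, hc]]
      rw [ih (c :: cur)]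
      by_cases ht : '.' ∈ t
      · have hm : '.' ∈ (c :: t) := List.mem_cons_of_mem _ ht
        simp [ht, hm, pvRStem, hc]
      · have hm : '.' ∉ (c :: t) := by simp [Ne.symm hc, ht]
        simp [ht, hm]

-- the two ports compute the same base string
theorem pvBase_eq (cs : List Char) :
    (PySem.List.slice (PySem.Chars.splitOn cs ['.']) none
        (some (((PySem.Chars.splitOn cs ['.']).length : Int) - 1))).foldl
      (fun acc part => acc ++ part) ([] : List Char)
    = PySem.Chars.replace (pvRStem cs) ['.'] [] := by
  rw [pvSplitOn_eq, pvReplace_eq]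
  have hslice : PySem.List.slice (pvSplitAux cs []) none
      (some (((pvSplitAux cs []).length : Int) - 1)) = (pvSplitAux cs []).dropLast := by
    rcases hl : pvSplitAux cs [] with _ | ⟨x, xs⟩
    · exact absurd hl (pvSplitAux_ne_nil cs [])
    · have : ((x :: xs).length : Int) - 1 = ((xs.length : Nat) : Int) := by simp
      rw [this, PySem.List.slice_to_natCast, List.dropLast_eq_take]
      simp
  rw [hslice]
  have hfold : ∀ (l : List (List Char)) (a : List Char),
      l.foldl (fun acc part => acc ++ part) a = a ++ l.flatten := by
    intro l
    induction l with
    | nil => intro a; simp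
    | cons x xs ih => intro a; simp [ih, List.append_assoc]
  rw [hfold, pvMaster cs []]
  by_cases h : '.' ∈ cs
  · simp [h]
  · simp [h, pvRStem_of_no_dot cs h]

-- ===== VERDICT (by name: the statement is the Claim_ definition above) =====
theorem generate_output_filename_spec : Claim_equal_generate_output_filename := by
  intro input_name _ _
  unfold Spec_generate_output_filename generate_output_filename generate_output_filename_alt
  simp only [pvBase_eq]
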